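-- pv_equiv track=rewrite | github.com/gitdevaldo/poster | core/group_scraper.py | _merge_scraped_lists
-- ===== SOURCE A (Python) =====
-- def _merge_scraped_lists(primary: list[dict[str, str]], fallback: list[dict[str, str]]) -> list[dict[str, str]]:
--     merged: dict[str, dict[str, str]] = {}
--     for item in primary + fallback:
--         group_id = str(item.get("id", "")).strip()
--         if not group_id:
--             continue
--         if group_id in merged:
--             merged[group_id]["name"] = item.get("name") or merged[group_id].get("name") or f"Group {group_id}"
--             merged[group_id]["url"] = item.get("url") or merged[group_id].get("url") or f"https://www.facebook.com/groups/{group_id}"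
--         else:
--             merged[group_id] = {
--                 "id": group_id,
--                 "name": item.get("name") or f"Group {group_id}",
--                 "url": item.get("url") or f"https://www.facebook.com/groups/{group_id}",
--             }
--     return list(merged.values())
-- ===== SOURCE B (Python) =====
-- def _merge_scraped_lists(primary: list[dict[str, str]], fallback: list[dict[str, str]]) -> list[dict[str, str]]:
--     # Phase 1: bucket every item by its stripped id, preserving first-seen order.
--     groups: dict[str, list[dict[str, str]]] = {}
--     for item in primary + fallback:
--         group_id = str(item.get("id", "")).strip()
--         if not group_id:
--             continue
--         groups[group_id] = groups.get(group_id, []) + [item]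
--     # Phase 2: reduce each bucket — last truthy name/url wins, defaults otherwise.
--     result: list[dict[str, str]] = []
--     for group_id, bucket in groups.items():
--         name = f"Group {group_id}"
--         url = f"https://www.facebook.com/groups/{group_id}"
--         for item in bucket:
--             name = item.get("name") or name
--             url = item.get("url") or url
--         result.append({"id": group_id, "name": name, "url": url})
--     return result
-- ===== Notes on version B (the rewrite author's own statement) =====
-- stated objective: alternative
-- what changed: Replaces A's streaming merge (one dict of result records updated in place per item) by a two-phase group-then-reduce: first bucket all items by stripped id into an ordered table, then reduce each bucket from the defaults with last-truthy-wins for name/url.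
import Mathlib
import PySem

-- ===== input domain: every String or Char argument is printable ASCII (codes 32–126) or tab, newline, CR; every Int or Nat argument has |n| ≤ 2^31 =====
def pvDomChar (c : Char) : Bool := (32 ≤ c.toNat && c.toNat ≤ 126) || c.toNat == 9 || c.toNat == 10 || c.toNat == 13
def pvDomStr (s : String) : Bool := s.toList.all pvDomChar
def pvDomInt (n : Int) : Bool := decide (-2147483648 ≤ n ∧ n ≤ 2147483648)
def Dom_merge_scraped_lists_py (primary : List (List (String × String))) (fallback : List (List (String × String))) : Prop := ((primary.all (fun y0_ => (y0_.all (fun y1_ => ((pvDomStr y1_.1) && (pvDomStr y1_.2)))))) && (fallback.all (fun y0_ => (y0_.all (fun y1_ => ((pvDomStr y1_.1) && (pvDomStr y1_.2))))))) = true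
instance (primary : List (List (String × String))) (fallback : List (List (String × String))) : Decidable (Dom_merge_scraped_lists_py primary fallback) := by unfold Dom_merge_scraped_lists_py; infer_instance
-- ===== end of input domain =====

-- B replaces A's streaming merge-in-a-dict by a two-phase group-then-reduce (bucket items by id,
-- then reduce each bucket over the defaults); a different decomposition, not faster. Return value only.

-- ===== PORT A =====
-- Python truthiness of `x or y` where x is d.get(k) (None or a str) and y a str: exact.
def pyOrStr (o : Option String) (d : String) : String :=
  match o with
  | none => d
  | some s => if s = "" then d else s

-- item.get(k) on a Python dict represented as an association list
def itemGet (item : List (String × String)) (k : String) : Option String :=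
  (PySem.Dict.ofList item).get? k

-- group_id = str(item.get("id", "")).strip()   (str() of a str is itself)
def gidOf (item : List (String × String)) : String :=
  PySem.Str.strip ((PySem.Dict.ofList item).getD "id" "")

-- one iteration of A's `for item in primary + fallback` loop over the merged dict
def stepA (m : PySem.Dict String (PySem.Dict String String)) (item : List (String × String)) :
    PySem.Dict String (PySem.Dict String String) :=
  let gid := gidOf item
  if gid = "" then m
  else if m.contains gid then
    let cur := m.getD gid PySem.Dict.empty   -- merged[group_id]; the key is present (contains)
    let cur1 := cur.insert "name" (pyOrStr (itemGet item "name") (pyOrStr (cur.get? "name") ("Group " ++ gid)))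
    let cur2 := cur1.insert "url" (pyOrStr (itemGet item "url") (pyOrStr (cur1.get? "url") ("https://www.facebook.com/groups/" ++ gid)))
    m.insert gid cur2
  else
    m.insert gid (PySem.Dict.mk
      [("id", gid),
       ("name", pyOrStr (itemGet item "name") ("Group " ++ gid)),
       ("url", pyOrStr (itemGet item "url") ("https://www.facebook.com/groups/" ++ gid))])

def merge_scraped_lists_py (primary : List (List (String × String))) (fallback : List (List (String × String))) : List (List (String × String)) :=
  (((primary ++ fallback).foldl stepA PySem.Dict.empty).values).map PySem.Dict.items

-- ===== PORT B =====
-- phase 1: groups[gid] = groups.get(gid, []) + [item]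
def stepB (g : PySem.Dict String (List (List (String × String)))) (item : List (String × String)) :
    PySem.Dict String (List (List (String × String))) :=
  let gid := gidOf item
  if gid = "" then g
  else g.insert gid (g.getD gid [] ++ [item])

-- phase 2 reducer: name/url start at the defaults, each bucket item overwrites them when truthy
def reduceB (gid : String) (bucket : List (List (String × String))) : List (String × String) :=
  let nu := bucket.foldl
    (fun (p : String × String) item => (pyOrStr (itemGet item "name") p.1, pyOrStr (itemGet item "url") p.2))
    ("Group " ++ gid, "https://www.facebook.com/groups/" ++ gid)
  [("id", gid), ("name", nu.1), ("url", nu.2)]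

def merge_scraped_lists_py_alt (primary : List (List (String × String))) (fallback : List (List (String × String))) : List (List (String × String)) :=
  (((primary ++ fallback).foldl stepB PySem.Dict.empty).items).map (fun q => reduceB q.1 q.2)

-- ===== PRECONDITION & SPEC =====
def Spec_merge_scraped_lists_py (primary : List (List (String × String))) (fallback : List (List (String × String))) (out : List (List (String × String))) : Prop := out = merge_scraped_lists_py_alt primary fallback
instance (primary : List (List (String × String))) (fallback : List (List (String × String))) (out : List (List (String × String))) : Decidable (Spec_merge_scraped_lists_py primary fallback out) := by unfold Spec_merge_scraped_lists_py; infer_instance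

-- ===== CLAIM (what is proved, stated in full; the proofs are below) =====
def Claim_equal_merge_scraped_lists_py : Prop := ∀ (primary : List (List (String × String))) (fallback : List (List (String × String))), Dom_merge_scraped_lists_py primary fallback → Spec_merge_scraped_lists_py primary fallback (merge_scraped_lists_py primary fallback)

-- ===== LEMMAS AND PROOFS =====

-- A's entry for an id, reconstructed from B's bucket for that id
def phi (gid : String) (bucket : List (List (String × String))) : PySem.Dict String String :=
  PySem.Dict.mk (reduceB gid bucket)

-- the invariant tying A's merged dict to B's bucket table
def MInv (m : PySem.Dict String (PySem.Dict String String))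
    (g : PySem.Dict String (List (List (String × String)))) : Prop :=
  m.items = g.items.map (fun q => (q.1, phi q.1 q.2))

theorem pyOrStr_ne_empty (o : Option String) (d : String) (hd : d ≠ "") : pyOrStr o d ≠ "" := by
  cases o with
  | none => exact hd
  | some s => simp only [pyOrStr]; split <;> simp_all

theorem group_default_ne (gid : String) : ("Group " ++ gid) ≠ "" := by
  intro h; have := congrArg String.toList h; simp at this

theorem url_default_ne (gid : String) : ("https://www.facebook.com/groups/" ++ gid) ≠ "" := by
  intro h; have := congrArg String.toList h; simp at this

theorem bucketFold_ne_empty (bucket : List (List (String × String))) (p : String × String)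
    (h1 : p.1 ≠ "") (h2 : p.2 ≠ "") :
    (bucket.foldl (fun (p : String × String) item =>
      (pyOrStr (itemGet item "name") p.1, pyOrStr (itemGet item "url") p.2)) p).1 ≠ "" ∧
    (bucket.foldl (fun (p : String × String) item =>
      (pyOrStr (itemGet item "name") p.1, pyOrStr (itemGet item "url") p.2)) p).2 ≠ "" := by
  induction bucket generalizing p with
  | nil => exact ⟨h1, h2⟩
  | cons it rest ih =>
    exact ih _ (pyOrStr_ne_empty _ _ h1) (pyOrStr_ne_empty _ _ h2)

theorem MInv_keys {m : PySem.Dict String (PySem.Dict String String)}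
    {g : PySem.Dict String (List (List (String × String)))} (h : MInv m g) : m.keys = g.keys := by
  simp only [PySem.Dict.keys, MInv] at h ⊢
  simp [h, List.map_map, Function.comp]

-- A's in-place update of an existing entry is exactly B's reducer taking one more step
theorem stepA_inner (gid : String) (b : List (List (String × String))) (item : List (String × String)) :
    ((phi gid b).insert "name"
        (pyOrStr (itemGet item "name") (pyOrStr ((phi gid b).get? "name") ("Group " ++ gid)))).insert "url"
      (pyOrStr (itemGet item "url")
        (pyOrStr ((((phi gid b).insert "name"
            (pyOrStr (itemGet item "name") (pyOrStr ((phi gid b).get? "name") ("Group " ++ gid)))).get? "url"))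
          ("https://www.facebook.com/groups/" ++ gid)))
      = phi gid (b ++ [item]) := by
  obtain ⟨hn, hu⟩ := bucketFold_ne_empty b ("Group " ++ gid, "https://www.facebook.com/groups/" ++ gid)
    (group_default_ne gid) (url_default_ne gid)
  set F := b.foldl (fun (p : String × String) item =>
      (pyOrStr (itemGet item "name") p.1, pyOrStr (itemGet item "url") p.2))
      ("Group " ++ gid, "https://www.facebook.com/groups/" ++ gid) with hF
  have hphi : phi gid b = PySem.Dict.mk [("id", gid), ("name", F.1), ("url", F.2)] := rfl
  have hget : (phi gid b).get? "name" = some F.1 := by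
    rw [hphi]; simp [PySem.Dict.get?_mk_cons]
  have h1 : (phi gid b).insert "name" (pyOrStr (itemGet item "name") (pyOrStr ((phi gid b).get? "name") ("Group " ++ gid)))
      = PySem.Dict.mk [("id", gid), ("name", pyOrStr (itemGet item "name") F.1), ("url", F.2)] := by
    rw [hget, hphi]
    have : pyOrStr (some F.1) ("Group " ++ gid) = F.1 := by simp [pyOrStr, hn]
    rw [this]
    apply PySem.Dict.ext
    rw [PySem.Dict.items_insert_of_contains] <;> simp
  rw [h1]
  have hget2 : (PySem.Dict.mk [("id", gid), ("name", pyOrStr (itemGet item "name") F.1), ("url", F.2)]).get? "url" = some F.2 := by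
    simp [PySem.Dict.get?_mk_cons]
  rw [hget2]
  have : pyOrStr (some F.2) ("https://www.facebook.com/groups/" ++ gid) = F.2 := by simp [pyOrStr, hu]
  rw [this]
  have h2 : phi gid (b ++ [item]) = PySem.Dict.mk
      [("id", gid), ("name", pyOrStr (itemGet item "name") F.1), ("url", pyOrStr (itemGet item "url") F.2)] := by
    simp only [phi, reduceB, List.foldl_append, List.foldl_cons, List.foldl_nil, hF]
  rw [h2]
  apply PySem.Dict.ext
  rw [PySem.Dict.items_insert_of_contains] <;> simp

theorem MInv_step (item : List (String × String))
    (m : PySem.Dict String (PySem.Dict String String))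
    (g : PySem.Dict String (List (List (String × String))))
    (h : MInv m g) (hnd : g.keys.Nodup) : MInv (stepA m item) (stepB g item) := by
  by_cases hg : gidOf item = ""
  · simpa [stepA, stepB, hg] using h
  · have hkeys := MInv_keys h
    have hc : m.contains (gidOf item) = g.contains (gidOf item) := by
      rw [PySem.Dict.contains_eq_decide_mem_keys, PySem.Dict.contains_eq_decide_mem_keys, hkeys]
    have hmnd : m.keys.Nodup := hkeys ▸ hnd
    by_cases hcg : g.contains (gidOf item) = true
    · -- existing id: A updates the entry in place, B appends to the bucket
      set gid := gidOf item with hgid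
      have hcm : m.contains gid = true := hc ▸ hcg
      set b := g.getD gid [] with hb
      have hmem : (gid, b) ∈ g.items := by
        have hcg' := hcg
        rw [PySem.Dict.contains_eq_isSome_get?] at hcg'
        obtain ⟨v, hv⟩ := Option.isSome_iff_exists.mp hcg'
        have hbv : b = v := by simp [hb, PySem.Dict.getD_eq_get?_getD, hv]
        refine hbv ▸ ?_
        apply PySem.Dict.mem_items_of_get?_eq_some
        exact hv
      have hmmem : (gid, phi gid b) ∈ m.items := by
        rw [h]; exact List.mem_map_of_mem hmem
      have hcur : m.getD gid PySem.Dict.empty = phi gid b := by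
        apply PySem.Dict.getD_of_mem_items <;> assumption
      show MInv _ _
      unfold MInv stepA stepB
      simp only [← hgid, hg, ite_false, hcm, if_pos, ← hb, hcur, stepA_inner]
      rw [PySem.Dict.items_insert_of_contains _ _ hcm, PySem.Dict.items_insert_of_contains _ _ hcg, h,
        List.map_map, List.map_map]
      apply List.map_congr_left
      intro q _
      by_cases hq : q.1 = gid <;> simp [Function.comp, hq]
    · -- fresh id: both append a new entry
      have hcg' : g.contains (gidOf item) = false := by simpa using hcg
      have hcm : m.contains (gidOf item) = false := by rw [hc]; exact hcg'
      show MInv _ _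
      unfold MInv stepA stepB
      simp only [hg, ite_false, hcm, Bool.false_eq_true]
      rw [PySem.Dict.items_insert_of_not_contains _ _ hcm, PySem.Dict.items_insert_of_not_contains _ _ hcg', h]
      have hgd : g.getD (gidOf item) [] = [] := by
        apply PySem.Dict.getD_of_not_contains; exact hcg'
      simp [phi, reduceB, hgd]

theorem MInv_foldl (items : List (List (String × String)))
    (m : PySem.Dict String (PySem.Dict String String))
    (g : PySem.Dict String (List (List (String × String))))
    (h : MInv m g) (hnd : g.keys.Nodup) :
    MInv (items.foldl stepA m) (items.foldl stepB g) := by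
  induction items generalizing m g with
  | nil => exact h
  | cons it rest ih =>
    refine ih _ _ (MInv_step it m g h hnd) ?_
    by_cases hg : gidOf it = ""
    · simpa [stepB, hg] using hnd
    · simpa [stepB, hg] using PySem.Dict.nodup_keys_insert g (gidOf it) (g.getD (gidOf it) [] ++ [it]) hnd

-- ===== VERDICT (by name: the statement is the Claim_ definition above) =====
theorem merge_scraped_lists_py_spec : Claim_equal_merge_scraped_lists_py := by
  intro primary fallback _
  show _ = _
  have h := MInv_foldl (primary ++ fallback) PySem.Dict.empty PySem.Dict.empty rfl (by simp)
  unfold merge_scraped_lists_py merge_scraped_lists_py_alt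
  show ((((primary ++ fallback).foldl stepA PySem.Dict.empty).items.map (·.2)).map PySem.Dict.items) = _
  rw [h]
  simp [phi, Function.comp]
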